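-- pv_equiv track=rewrite | github.com/brooksky/NUS_ISS_PLP_PracticeModule_Group13 | model_predict_timestamp_bert_pretrain.py | bert_segment_task_2
-- ===== SOURCE A (Python) =====
-- def bert_segment_task_2(new_t):
--     sentence_id = 0
--     segment_ids = []
--     for word in new_t:
--         if word == '[SEP]':
--             segment_ids.append(sentence_id)
--             sentence_id += 1
--         else:
--             segment_ids.append(sentence_id)
--
--     return segment_ids
-- ===== SOURCE B (Python) =====
-- def bert_segment_task_2(new_t):
--     out = []
--     seg = 0
--     rest = new_t
--     while '[SEP]' in rest:
--         i = rest.index('[SEP]')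
--         out += [seg] * (i + 1)
--         rest = rest[i + 1:]
--         seg += 1
--     out += [seg] * len(rest)
--     return out
-- ===== Notes on version B (the rewrite author's own statement) =====
-- stated objective: alternative
-- what changed: Replaces A's per-word running-counter loop by a marker-jumping loop: repeatedly locate the next '[SEP]' with list.index, emit the whole segment as a constant block [seg]*(i+1), and continue on the remaining suffix.
import Mathlib
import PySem

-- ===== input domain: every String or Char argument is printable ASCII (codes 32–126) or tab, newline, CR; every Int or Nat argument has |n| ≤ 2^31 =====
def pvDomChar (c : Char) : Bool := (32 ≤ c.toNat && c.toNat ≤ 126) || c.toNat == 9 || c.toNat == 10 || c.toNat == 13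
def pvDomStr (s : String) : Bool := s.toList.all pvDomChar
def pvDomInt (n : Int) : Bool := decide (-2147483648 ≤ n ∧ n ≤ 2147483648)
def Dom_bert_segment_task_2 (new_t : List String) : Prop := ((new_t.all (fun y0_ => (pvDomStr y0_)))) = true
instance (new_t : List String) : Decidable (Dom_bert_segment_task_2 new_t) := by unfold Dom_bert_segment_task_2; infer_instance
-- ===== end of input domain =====

-- B replaces A's per-word counter loop by a marker-jumping loop: it repeatedly finds the
-- next '[SEP]' and emits a whole constant block per segment (alternative decomposition).

-- ===== PORT A =====
-- loop state: (sentence_id, segment_ids); branches in A's order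
def bert_segment_task_2 (new_t : List String) : List Int :=
  (new_t.foldl (fun (st : Int × List Int) word =>
      if word = "[SEP]" then (st.1 + 1, st.2 ++ [st.1])
      else (st.1, st.2 ++ [st.1])) (0, [])).2

-- ===== PORT B =====
-- while-loop of Source B as recursion on the suffix `rest`; the `'[SEP]' in rest` test and
-- `rest.index('[SEP]')` are combined into one match on PySem.List.index? (none exactly
-- when the membership test is false); `rest[i+1:]` is PySem.List.slice.
def bertAltLoop (rest : List String) (seg : Int) (out : List Int) : List Int :=
  match h : PySem.List.index? rest "[SEP]" with
  | none => out ++ List.replicate rest.length seg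
  | some i =>
      bertAltLoop (PySem.List.slice rest (some ((i : Int) + 1)) none) (seg + 1)
        (out ++ List.replicate (i + 1) seg)
termination_by rest.length
decreasing_by
  obtain ⟨hk, -, -⟩ := PySem.List.getElem_of_index?_eq_some h
  have : PySem.List.slice rest (some ((i : Int) + 1)) none = rest.drop (i + 1) := by
    have := PySem.List.slice_from_natCast rest (i + 1)
    simpa [Nat.cast_add] using this
  simp [this]
  omega

def bert_segment_task_2_alt (new_t : List String) : List Int :=
  bertAltLoop new_t 0 []

-- ===== PRECONDITION & SPEC =====
def Spec_bert_segment_task_2 (new_t : List String) (out : List Int) : Prop := out = bert_segment_task_2_alt new_t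
instance (new_t : List String) (out : List Int) : Decidable (Spec_bert_segment_task_2 new_t out) := by unfold Spec_bert_segment_task_2; infer_instance

-- ===== CLAIM (what is proved, stated in full; the proofs are below) =====
def Claim_equal_bert_segment_task_2 : Prop := ∀ (new_t : List String), Dom_bert_segment_task_2 new_t → Spec_bert_segment_task_2 new_t (bert_segment_task_2 new_t)

-- ===== LEMMAS AND PROOFS =====

-- A's loop body, and its result starting from counter sid and empty accumulator
def bertStep (st : Int × List Int) (word : String) : Int × List Int :=
  if word = "[SEP]" then (st.1 + 1, st.2 ++ [st.1]) else (st.1, st.2 ++ [st.1])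

theorem bertStep_foldl_acc (l : List String) (sid : Int) (acc : List Int) :
    (l.foldl bertStep (sid, acc)).2 = acc ++ (l.foldl bertStep (sid, [])).2 := by
  induction l generalizing sid acc with
  | nil => simp
  | cons w t ih =>
      by_cases h : w = "[SEP]"
      · simp only [List.foldl_cons, bertStep, if_pos h]
        rw [ih (sid + 1) (acc ++ [sid]), ih (sid + 1) ([] ++ [sid])]
        simp
      · simp only [List.foldl_cons, bertStep, if_neg h]
        rw [ih sid (acc ++ [sid]), ih sid ([] ++ [sid])]
        simp

def bertFoldA (l : List String) (sid : Int) : List Int := (l.foldl bertStep (sid, [])).2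

theorem bertFoldA_cons (w : String) (t : List String) (sid : Int) :
    bertFoldA (w :: t) sid = sid :: bertFoldA t (if w = "[SEP]" then sid + 1 else sid) := by
  by_cases h : w = "[SEP]" <;>
    · simp only [bertFoldA, List.foldl_cons, bertStep, h]
      rw [bertStep_foldl_acc]
      simp

theorem bertFoldA_no_sep (l : List String) (sid : Int) (h : "[SEP]" ∉ l) :
    bertFoldA l sid = List.replicate l.length sid := by
  induction l generalizing sid with
  | nil => simp [bertFoldA]
  | cons w t ih =>
      have hw : w ≠ "[SEP]" := fun hw => h (hw ▸ List.mem_cons_self ..)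
      have ht : "[SEP]" ∉ t := fun ht => h (List.mem_cons_of_mem _ ht)
      rw [bertFoldA_cons, if_neg hw, ih sid ht]
      simp [List.replicate_succ]

theorem bertFoldA_split (pre suf : List String) (sid : Int) (h : "[SEP]" ∉ pre) :
    bertFoldA (pre ++ "[SEP]" :: suf) sid
      = List.replicate (pre.length + 1) sid ++ bertFoldA suf (sid + 1) := by
  induction pre generalizing sid with
  | nil => simp [bertFoldA_cons]
  | cons w t ih =>
      have hw : w ≠ "[SEP]" := fun hw => h (hw ▸ List.mem_cons_self ..)
      have ht : "[SEP]" ∉ t := fun ht => h (List.mem_cons_of_mem _ ht)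
      rw [List.cons_append, bertFoldA_cons, if_neg hw, ih sid ht]
      simp [List.replicate_succ]

theorem bertAltLoop_eq (n : ℕ) : ∀ (rest : List String), rest.length ≤ n →
    ∀ (seg : Int) (out : List Int), bertAltLoop rest seg out = out ++ bertFoldA rest seg := by
  induction n with
  | zero =>
      intro rest hr seg out
      have hnil : rest = [] := List.eq_nil_of_length_eq_zero (Nat.le_zero.mp hr)
      subst hnil
      rw [bertAltLoop]
      split
      · simp [bertFoldA]
      · next i hidx =>
          obtain ⟨pre, suf, hs, -, -⟩ := (PySem.List.index?_eq_some_iff [] "[SEP]" i).mp hidx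
          simp at hs
  | succ n ih =>
      intro rest hr seg out
      rw [bertAltLoop]
      split
      · next hidx =>
          rw [bertFoldA_no_sep rest seg ((PySem.List.index?_eq_none_iff rest "[SEP]").mp hidx)]
      · next i hidx =>
          obtain ⟨pre, suf, hsplit, hlen, hpre⟩ := (PySem.List.index?_eq_some_iff rest "[SEP]" i).mp hidx
          have hslice : PySem.List.slice rest (some ((i : Int) + 1)) none = rest.drop (i + 1) := by
            have := PySem.List.slice_from_natCast rest (i + 1)
            simpa [Nat.cast_add] using this
          have hdrop : rest.drop (i + 1) = suf := by
            subst hsplit hlen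
            simp
          have hlsuf : suf.length ≤ n := by
            subst hsplit hlen
            simp at hr
            omega
          rw [hslice, hdrop, ih suf hlsuf (seg + 1) (out ++ List.replicate (i + 1) seg)]
          subst hsplit hlen
          rw [bertFoldA_split pre suf seg hpre]
          simp

-- ===== VERDICT (by name: the statement is the Claim_ definition above) =====
theorem bert_segment_task_2_spec : Claim_equal_bert_segment_task_2 := by
  intro new_t _
  unfold Spec_bert_segment_task_2 bert_segment_task_2 bert_segment_task_2_alt
  rw [bertAltLoop_eq new_t.length new_t le_rfl 0 []]
  rfl
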